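-- pv_equiv track=rewrite | github.com/puishak/University | CISC 121/Assignment 4/A4_2.py | hopping_game
-- ===== SOURCE A (Python) =====
-- from typing import List
--
-- def hopping_game(n: int)-> List[str]:
--     """Return a list of all possible hopping paths with n number of squares.
--     Hops can be consited of either 1 square or 2 squares.
--     """
--     #Base Cases for this recursive function is n = 0, 1 and, 2
--     if n == 0:
--         return []
--     elif n == 1:
--         return ["0-1"]
--     elif n == 2:
--         return ["0-1-2", "0-2"]
--     #The recursive potion of the function begins here
--     else:
--         output = []
--
--         #This for loop creates all possible paths if the initial hop covers only
--         #one square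
--         for path in hopping_game(n-1):
--             new_path = "0"
--             #This inner for loop offsets each step by 1 and adds it to the
--             #new_path
--             for step in path.split("-"):
--                 new_path += "-"+str(int(step) + 1)
--             output.append(new_path)
--
--         #This for loop does the exact same thing as the last for loop except the
--         #hop covers 2 squares
--         for path in hopping_game(n-2):
--             new_path = "0"
--             for step in path.split("-"):
--                 new_path += "-"+str(int(step) + 2)
--             output.append(new_path)
--
--         return output
-- ===== SOURCE B (Python) =====
-- from typing import List
--
-- def _shift(path: str, d: int) -> str:
--     """Prefix a path with square 0 and offset every later square by d."""
--     out = "0"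
--     for step in path.split("-"):
--         out += "-" + str(int(step) + d)
--     return out
--
-- def hopping_game(n: int) -> List[str]:
--     """Bottom-up DP: each subproblem is computed once (rolling pair of levels),
--     instead of A's exponential recomputation via double recursion."""
--     if n <= 0:
--         return []
--     if n == 1:
--         return ["0-1"]
--     prev, cur = ["0-1"], ["0-1-2", "0-2"]
--     for _ in range(n - 2):
--         prev, cur = cur, [_shift(p, 1) for p in cur] + [_shift(p, 2) for p in prev]
--     return cur
-- ===== Notes on version B (the rewrite author's own statement) =====
-- stated objective: faster
-- what changed: Replaces the naive double recursion (which recomputes every subproblem exponentially often) by a bottom-up dynamic program keeping only the last two levels, so each subproblem's path list is built exactly once.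
-- outside the precondition, e.g. on hopping_game(-2): A raises RecursionError, B returns []
import Mathlib
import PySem

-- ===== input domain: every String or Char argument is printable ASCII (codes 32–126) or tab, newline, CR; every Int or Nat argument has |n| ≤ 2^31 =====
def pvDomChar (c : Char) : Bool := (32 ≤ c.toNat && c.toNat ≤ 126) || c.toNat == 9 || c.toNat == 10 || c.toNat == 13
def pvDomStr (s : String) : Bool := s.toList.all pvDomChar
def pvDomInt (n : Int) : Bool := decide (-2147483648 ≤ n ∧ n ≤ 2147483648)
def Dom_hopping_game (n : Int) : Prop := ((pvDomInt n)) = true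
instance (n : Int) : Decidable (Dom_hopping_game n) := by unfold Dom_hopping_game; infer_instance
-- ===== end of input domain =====

-- B replaces A's exponential double recursion by a bottom-up DP over the last two levels
-- (each subproblem computed once); equal outputs on n ≥ 0, where A returns.

-- ===== PORT A =====
-- the inner loop of A: new_path = "0"; for step in path.split("-"): new_path += "-" + str(int(step) + d)
-- (strings handled on List Char so the kernel can evaluate; int(step) never fails on A's own
--  paths, ported as ofChars? with default 0 at the none case Python's int() would raise on)
def pvShift (d : Int) (path : String) : String :=
  String.ofList ((PySem.Chars.splitOn path.toList ['-']).foldl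
    (fun acc step => acc ++ ('-' :: PySem.Int.toChars ((PySem.Int.ofChars? step).getD 0 + d))) ['0'])

-- A's recursion, with fuel = n.toNat making it total in Lean (for n ≥ 0 the fuel is never
-- exhausted; the Python raises RecursionError for n < 0, excluded by Pre_)
def hoppingA : Nat → Int → List String
  | fuel, n =>
    if n = 0 then []
    else if n = 1 then ["0-1"]
    else if n = 2 then ["0-1-2", "0-2"]
    else
      match fuel with
      | 0 => []
      | f + 1 =>
        (hoppingA f (n - 2)).foldl (fun out path => out ++ [pvShift 2 path])
          ((hoppingA f (n - 1)).foldl (fun out path => out ++ [pvShift 1 path]) [])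

def hopping_game (n : Int) : List String := hoppingA n.toNat n

-- ===== PORT B =====
def hopping_game_alt (n : Int) : List String :=
  if n ≤ 0 then []
  else if n = 1 then ["0-1"]
  else
    ((PySem.List.pyRange 0 (n - 2) 1).foldl
      (fun (st : List String × List String) _ =>
        (st.2, st.2.map (pvShift 1) ++ st.1.map (pvShift 2)))
      (["0-1"], ["0-1-2", "0-2"])).2

-- ===== PRECONDITION & SPEC =====
-- Pre_ excludes exactly n < 0, where Python A recurses past all base cases
-- and raises RecursionError.
def Pre_hopping_game (n : Int) : Prop := 0 ≤ n
instance (n : Int) : Decidable (Pre_hopping_game n) := by unfold Pre_hopping_game; infer_instance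
def pvWitness_hopping_game : Int := 4

def Spec_hopping_game (n : Int) (out : List String) : Prop := out = hopping_game_alt n
instance (n : Int) (out : List String) : Decidable (Spec_hopping_game n out) := by unfold Spec_hopping_game; infer_instance

-- ===== CLAIM =====
def Claim_equal_hopping_game : Prop := ∀ (n : Int), Dom_hopping_game n → Pre_hopping_game n → Spec_hopping_game n (hopping_game n)

-- ===== LEMMAS AND PROOFS =====

-- A's append-loops are maps
lemma hoppingA_succ (f : Nat) (n : Int) (h3 : 3 ≤ n) :
    hoppingA (f + 1) n =
      (hoppingA f (n - 1)).map (pvShift 1) ++ (hoppingA f (n - 2)).map (pvShift 2) := by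
  rw [hoppingA]
  rw [if_neg (by omega), if_neg (by omega), if_neg (by omega)]
  rw [PySem.List.foldl_append_singleton_eq_map, PySem.List.foldl_append_singleton_eq_map]
  simp

-- fuel irrelevance: any fuel ≥ n.toNat computes the same list
lemma hoppingA_fuel (f g : Nat) (n : Int) (hn : 0 ≤ n) (hf : n.toNat ≤ f) (hg : n.toNat ≤ g) :
    hoppingA f n = hoppingA g n := by
  induction f using Nat.strong_induction_on generalizing g n with
  | _ f ih =>
    by_cases h0 : n = 0
    · subst h0; rw [hoppingA.eq_def, hoppingA.eq_def]; simp
    by_cases h1 : n = 1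
    · subst h1; rw [hoppingA.eq_def, hoppingA.eq_def]; simp
    by_cases h2 : n = 2
    · subst h2; rw [hoppingA.eq_def, hoppingA.eq_def]; simp
    have h3 : 3 ≤ n := by omega
    have hfn : 3 ≤ n.toNat := by omega
    obtain ⟨f', rfl⟩ : ∃ f', f = f' + 1 := ⟨f - 1, by omega⟩
    obtain ⟨g', rfl⟩ : ∃ g', g = g' + 1 := ⟨g - 1, by omega⟩
    rw [hoppingA_succ f' n h3, hoppingA_succ g' n h3]
    have e1 : hoppingA f' (n - 1) = hoppingA g' (n - 1) := by
      have := ih f' (by omega) g' (n - 1) (by omega) (by omega) (by omega)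
      exact this
    have e2 : hoppingA f' (n - 2) = hoppingA g' (n - 2) := by
      have := ih f' (by omega) g' (n - 2) (by omega) (by omega) (by omega)
      exact this
    rw [e1, e2]

-- A's recurrence, stated on hopping_game
lemma hopping_game_rec (n : Int) (h3 : 3 ≤ n) :
    hopping_game n =
      (hopping_game (n - 1)).map (pvShift 1) ++ (hopping_game (n - 2)).map (pvShift 2) := by
  unfold hopping_game
  obtain ⟨f, hf⟩ : ∃ f, n.toNat = f + 1 := ⟨n.toNat - 1, by omega⟩
  rw [hf, hoppingA_succ f n h3,
    hoppingA_fuel f (n - 1).toNat (n - 1) (by omega) (by omega) (le_refl _),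
    hoppingA_fuel f (n - 2).toNat (n - 2) (by omega) (by omega) (le_refl _)]

-- B's rolling-pair loop after m steps holds levels m+1 and m+2 of A
lemma hoppingB_loop (m : Nat) :
    (PySem.List.pyRange 0 (m : Int) 1).foldl
      (fun (st : List String × List String) _ =>
        (st.2, st.2.map (pvShift 1) ++ st.1.map (pvShift 2)))
      (["0-1"], ["0-1-2", "0-2"]) =
    (hopping_game ((m : Int) + 1), hopping_game ((m : Int) + 2)) := by
  induction m with
  | zero => decide
  | succ k ih =>
    rw [show ((k + 1 : Nat) : Int) = (k : Int) + 1 by push_cast; ring]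
    rw [PySem.List.pyRange_one_succ_right (by omega), List.foldl_append, ih]
    simp only [List.foldl_cons, List.foldl_nil]
    simp only [Prod.mk.injEq]
    refine ⟨rfl, ?_⟩
    rw [show (k:Int)+1+2 = (k:Int)+3 by ring, hopping_game_rec ((k:Int)+3) (by omega),
      show (k:Int)+3-1 = (k:Int)+2 by ring, show (k:Int)+3-2 = (k:Int)+1 by ring]

-- ===== VERDICT =====
theorem hopping_game_spec : Claim_equal_hopping_game := by
  intro n _ hpre
  unfold Pre_hopping_game at hpre
  unfold Spec_hopping_game hopping_game_alt
  by_cases h0 : n = 0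
  · subst h0; decide
  by_cases h1 : n = 1
  · subst h1; decide
  have h2 : 2 ≤ n := by omega
  rw [if_neg (by omega), if_neg h1]
  obtain ⟨m, hm⟩ : ∃ m : Nat, n - 2 = (m : Int) := ⟨(n - 2).toNat, by omega⟩
  rw [hm, hoppingB_loop m]
  have : (m : Int) + 2 = n := by omega
  rw [this]
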